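-- pv_equiv track=rewrite | github.com/palffybalazs/CompressionMethods | lz77.py | compression_lz77
-- ===== SOURCE A (Python) =====
-- def compression_lz77(data):
--     # Initialize an empty list to store compressed data
--     compressed_data = []
--     # Set the size of the sliding window and lookahead buffer
--     window_size = 1000
--     lookahead_buffer_size = 20
--     i = 0
--     while i < len(data):
--         # Determine the start and end indices of the search window and lookahead buffer
--         search_window_start = max(0, i - window_size)
--         search_window = data[search_window_start:i]
--         lookahead_buffer_end = min(i + lookahead_buffer_size, len(data))
--         lookahead_buffer = data[i:lookahead_buffer_end]
--         # Find the longest match between the search window and lookahead buffer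
--         offset, length = find_longest_match(search_window, lookahead_buffer)
--         # Get the next character after the match
--         next_character = data[i + length] if i + length < len(data) else ""
--         # Add the compressed entry to the list
--         compressed_data.append((offset, length, next_character))
--         # Move the index based on the length of the match
--         i += length + 1
--
--     return compressed_data
--
-- def find_longest_match(search_window, lookahead_buffer):
--     # Initialize the best offset and length to 0
--     best_offset = 0
--     best_length = 0
--
--     for i in range(1, len(lookahead_buffer) + 1):
--         # Get the current window from the lookahead buffer
--         current_window = lookahead_buffer[:i]
--         # Find the last occurrence of the current window in the search window
--         offset = search_window.rfind(current_window)
--         # If a match is found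
--         if offset != -1:
--             length = len(current_window)
--             # Update the best offset and length if the current match is longer
--             if length > best_length:
--                 best_offset = len(search_window) - offset
--                 best_length = length
--
--     return best_offset, best_length
-- ===== SOURCE B (Python) =====
-- def compression_lz77(data):
--     compressed_data = []
--     window_size = 1000
--     lookahead_buffer_size = 20
--     n = len(data)
--     i = 0
--     while i < n:
--         start = max(0, i - window_size)
--         la_end = min(i + lookahead_buffer_size, n)
--         best_j = -1
--         best_length = 0
--         # scan candidate start positions; rightmost wins on ties (matches rfind)
--         for j in range(start, i):
--             length = 0
--             while j + length < i and i + length < la_end and data[j + length] == data[i + length]: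
--                 length += 1
--             if length > 0 and length >= best_length:
--                 best_j, best_length = j, length
--         offset = i - best_j if best_j >= 0 else 0
--         next_character = data[i + best_length] if i + best_length < n else ""
--         compressed_data.append((offset, best_length, next_character))
--         i += best_length + 1
--     return compressed_data
-- ===== Notes on version B (the rewrite author's own statement) =====
-- stated objective: alternative
-- what changed: find_longest_match no longer probes each prefix length with str.rfind; instead B scans each candidate start position in the window once, greedily counting matching characters (capped so the match stays in the window and the lookahead), keeping the rightmost maximal match to reproduce rfind's tie-breaking.
import Mathlib
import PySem

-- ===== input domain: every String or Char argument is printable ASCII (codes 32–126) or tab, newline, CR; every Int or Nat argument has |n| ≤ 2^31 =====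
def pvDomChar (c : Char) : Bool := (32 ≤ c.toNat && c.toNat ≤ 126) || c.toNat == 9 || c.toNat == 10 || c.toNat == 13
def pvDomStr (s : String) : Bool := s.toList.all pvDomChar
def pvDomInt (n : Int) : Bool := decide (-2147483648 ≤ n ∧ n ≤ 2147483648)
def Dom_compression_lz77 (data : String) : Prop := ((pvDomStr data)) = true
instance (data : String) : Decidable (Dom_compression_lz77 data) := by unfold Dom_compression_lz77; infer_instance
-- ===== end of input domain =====

-- B replaces find_longest_match's prefix-length probing with rfind by a single scan over candidate
-- start positions that greedily counts matching characters (alternative decomposition, same results).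

-- ===== PORT A =====
-- find_longest_match: for i in range(1, len(lookahead_buffer)+1) — here i = k + 1 for k in range(len la)
def findLongestMatch (sw la : List Char) : Int × Nat :=
  (List.range la.length).foldl
    (fun best k =>
      let i : Nat := k + 1
      let cur := PySem.List.slice la none (some (i : Int))       -- lookahead_buffer[:i]
      let offset := PySem.Chars.rfind sw cur                     -- search_window.rfind(current_window)
      if offset ≠ -1 then
        let length := cur.length
        if length > best.2 then ((sw.length : Int) - offset, length) else best
      else best)
    ((0 : Int), (0 : Nat))

-- the while-loop of compression_lz77; i - 1000 (Nat subtraction) = max(0, i - window_size)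
def lz77Loop (data : List Char) (i : Nat) : List (Int × Int × String) :=
  if h : i < data.length then
    let swStart := i - 1000
    let sw := PySem.List.slice data (some (swStart : Int)) (some (i : Int))
    let laEnd := min (i + 20) data.length
    let la := PySem.List.slice data (some (i : Int)) (some (laEnd : Int))
    let r := findLongestMatch sw la
    -- data[i + length] if i + length < len(data) else "" (the guard keeps getD exact)
    let nc : String := if i + r.2 < data.length then String.ofList [data.getD (i + r.2) 'a'] else ""
    (r.1, (r.2 : Int), nc) :: lz77Loop data (i + r.2 + 1)
  else []
  termination_by data.length - i
  decreasing_by omega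

def compression_lz77 (data : String) : List (Int × Int × String) :=
  lz77Loop data.toList 0

-- ===== PORT B =====
-- inner while of Source B: count matches while the match stays inside the window and the lookahead
def matchLenAt (data : List Char) (i laEnd j len : Nat) : Nat :=
  if h : j + len < i ∧ i + len < laEnd ∧ data.getD (j + len) 'a' = data.getD (i + len) 'a'
  then matchLenAt data i laEnd j (len + 1)
  else len
  termination_by i - (j + len)
  decreasing_by omega

-- for j in range(start, i): rightmost candidate of maximal match length wins
def bestMatch (data : List Char) (start i laEnd : Nat) : Int × Nat :=
  (List.range' start (i - start)).foldl
    (fun best j =>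
      let len := matchLenAt data i laEnd j 0
      if 0 < len ∧ best.2 ≤ len then ((j : Int), len) else best)
    ((-1 : Int), (0 : Nat))

def lz77LoopAlt (data : List Char) (i : Nat) : List (Int × Int × String) :=
  if h : i < data.length then
    let start := i - 1000
    let laEnd := min (i + 20) data.length
    let b := bestMatch data start i laEnd
    let offset : Int := if 0 ≤ b.1 then (i : Int) - b.1 else 0
    let nc : String := if i + b.2 < data.length then String.ofList [data.getD (i + b.2) 'a'] else ""
    (offset, (b.2 : Int), nc) :: lz77LoopAlt data (i + b.2 + 1)
  else []
  termination_by data.length - i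
  decreasing_by omega

def compression_lz77_alt (data : String) : List (Int × Int × String) :=
  lz77LoopAlt data.toList 0

-- ===== PRECONDITION & SPEC =====
def Spec_compression_lz77 (data : String) (out : List (Int × Int × String)) : Prop := out = compression_lz77_alt data
instance (data : String) (out : List (Int × Int × String)) : Decidable (Spec_compression_lz77 data out) := by unfold Spec_compression_lz77; infer_instance

-- ===== CLAIM (what is proved, stated in full; the proofs are below) =====
def Claim_equal_compression_lz77 : Prop := ∀ (data : String), Dom_compression_lz77 data → Spec_compression_lz77 data (compression_lz77 data)

-- ===== LEMMAS AND PROOFS =====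

-- "the first t characters of the lookahead (from i) also occur starting at j, inside the window [.., i)"
def MOk (data : List Char) (i laEnd j t : Nat) : Prop :=
  j + t ≤ i ∧ i + t ≤ laEnd ∧ ∀ k < t, data.getD (j + k) 'a' = data.getD (i + k) 'a'

lemma matchLenAt_not_cond (data : List Char) (i laEnd j : Nat) : ∀ len,
    ¬ (j + matchLenAt data i laEnd j len < i ∧ i + matchLenAt data i laEnd j len < laEnd ∧
       data.getD (j + matchLenAt data i laEnd j len) 'a' = data.getD (i + matchLenAt data i laEnd j len) 'a') := by
  intro len
  fun_induction matchLenAt data i laEnd j len with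
  | case1 len h ih => exact ih
  | case2 len h => exact h

lemma matchLenAt_ok (data : List Char) (i laEnd j : Nat) : ∀ len,
    MOk data i laEnd j len → MOk data i laEnd j (matchLenAt data i laEnd j len) := by
  intro len
  fun_induction matchLenAt data i laEnd j len with
  | case1 len h ih =>
      intro hok
      refine ih ⟨by omega, by omega, ?_⟩
      intro k hk
      rcases Nat.lt_succ_iff_lt_or_eq.mp hk with hk' | hk'
      · exact hok.2.2 k hk'
      · subst hk'; exact h.2.2
  | case2 len h => exact id

lemma matchLenAt_max (data : List Char) (i laEnd j t : Nat) (h : MOk data i laEnd j t) :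
    t ≤ matchLenAt data i laEnd j 0 := by
  obtain ⟨hb1, hb2, hm⟩ := h
  by_contra hlt
  push Not at hlt
  exact matchLenAt_not_cond data i laEnd j 0
    ⟨by omega, by omega, hm _ (by omega)⟩

lemma matchLenAt_ok0 (data : List Char) (i laEnd j : Nat) (hj : j ≤ i) (hi : i ≤ laEnd) :
    MOk data i laEnd j (matchLenAt data i laEnd j 0) :=
  matchLenAt_ok data i laEnd j 0 ⟨by omega, by omega, by omega⟩

-- a prefix-of-a-drop inside the two slices is exactly a greedy-checkable match
lemma prefix_iff_mok (data : List Char) (start i laEnd : Nat)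
    (h1 : start ≤ i) (h2 : i ≤ laEnd) (h3 : laEnd ≤ data.length)
    (j : Nat) (hj : start ≤ j) (hj2 : j ≤ i) (t : Nat) :
    (((data.drop i).take (laEnd - i)).take t <+: ((data.drop start).take (i - start)).drop (j - start) ∧ t ≤ laEnd - i)
      ↔ MOk data i laEnd j t := by
  have hswd : (((data.drop start).take (i - start)).drop (j - start)).length = i - j := by
    simp [List.length_take, List.length_drop]; omega
  constructor
  · rintro ⟨hpre, ht⟩
    have hlen : (((data.drop i).take (laEnd - i)).take t).length = t := by
      simp [List.length_take]; omega
    have hle := hpre.length_le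
    rw [hlen, hswd] at hle
    refine ⟨by omega, by omega, ?_⟩
    intro k hk
    have hg := hpre.getElem (i := k) (by omega)
    simp only [List.getElem_take, List.getElem_drop] at hg
    rw [List.getD_eq_getElem data 'a' (by omega), List.getD_eq_getElem data 'a' (by omega)]
    have hidx : data[j + k]'(by omega) = data[start + (j - start + k)]'(by omega) := by
      congr 1; omega
    exact hidx.trans hg.symm
  · rintro ⟨hb1, hb2, hm⟩
    refine ⟨?_, by omega⟩
    rw [List.prefix_iff_eq_take]
    apply List.ext_getElem
    · simp [List.length_take, List.length_drop]; omega
    · intro k hk1 hk2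
      have hkt : k < t := by
        simp [List.length_take, List.length_drop] at hk1; omega
      simp only [List.getElem_take, List.getElem_drop]
      have := hm k hkt
      rw [List.getD_eq_getElem data 'a' (by omega), List.getD_eq_getElem data 'a' (by omega)] at this
      have hidx : data[start + (j - start + k)]'(by omega) = data[j + k]'(by omega) := by
        congr 1; omega
      exact this.symm.trans hidx.symm

lemma infix_iff_prefix_drop (l s : List Char) : l <:+: s ↔ ∃ j, j ≤ s.length ∧ l <+: s.drop j := by
  constructor
  · intro h
    rcases List.infix_iff_prefix_suffix.mp h with ⟨tl, hpre, hsuf⟩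
    refine ⟨s.length - tl.length, by omega, ?_⟩
    rwa [List.suffix_iff_eq_drop.mp hsuf] at hpre
  · rintro ⟨j, hj, hpre⟩
    exact List.infix_iff_prefix_suffix.mpr ⟨s.drop j, hpre, List.drop_suffix j s⟩

lemma go_zero (s sub : List Char) : PySem.Chars.rfind.go s sub 0 = if sub.isPrefixOf s then 0 else -1 := by
  rfl

lemma go_succ (s sub : List Char) (j : Nat) :
    PySem.Chars.rfind.go s sub (j+1) = if sub.isPrefixOf (s.drop (j+1)) then ((j+1 : Nat) : Int) else PySem.Chars.rfind.go s sub j := by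
  rfl

-- rfind.go either fails everywhere below its bound, or returns the highest occurrence below it
lemma rfind_go_cases (s sub : List Char) : ∀ k,
    (PySem.Chars.rfind.go s sub k = -1 ∧ ∀ j ≤ k, ¬ sub <+: s.drop j) ∨
    (∃ jm, jm ≤ k ∧ PySem.Chars.rfind.go s sub k = (jm : Int) ∧ sub <+: s.drop jm ∧
      ∀ j, jm < j → j ≤ k → ¬ sub <+: s.drop j) := by
  intro k
  induction k with
  | zero =>
      rw [go_zero]
      by_cases hp : sub.isPrefixOf s
      · right
        exact ⟨0, le_refl 0, by rw [if_pos hp]; rfl, by simpa using List.isPrefixOf_iff_prefix.mp hp,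
          by intro j h1 h2; exact absurd h1 (by omega)⟩
      · left
        refine ⟨by rw [if_neg hp], ?_⟩
        intro j hj
        interval_cases j
        simpa using fun h => hp (List.isPrefixOf_iff_prefix.mpr h)
  | succ n ih =>
      rw [go_succ]
      by_cases hp : sub.isPrefixOf (s.drop (n+1))
      · right
        exact ⟨n+1, le_refl _, by rw [if_pos hp], List.isPrefixOf_iff_prefix.mp hp,
          by intro j h1 h2; exact absurd h1 (by omega)⟩
      · rw [if_neg hp]
        have hnp : ¬ sub <+: s.drop (n+1) := fun h => hp (List.isPrefixOf_iff_prefix.mpr h)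
        rcases ih with ⟨he, hall⟩ | ⟨jm, hjm, he, hpre, hmax⟩
        · left
          refine ⟨he, ?_⟩
          intro j hj
          rcases Nat.lt_succ_iff_lt_or_eq.mp (Nat.lt_succ_of_le hj) with h' | h'
          · exact hall j (by omega)
          · subst h'; exact hnp
        · right
          refine ⟨jm, by omega, he, hpre, ?_⟩
          intro j h1 h2
          rcases Nat.lt_succ_iff_lt_or_eq.mp (Nat.lt_succ_of_le h2) with h' | h'
          · exact hmax j h1 (by omega)
          · subst h'; exact hnp

lemma rfind_eq_neg_one_iff (sw cur : List Char) : PySem.Chars.rfind sw cur = -1 ↔ ¬ cur <:+: sw := by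
  have hgo : PySem.Chars.rfind sw cur = PySem.Chars.rfind.go sw cur sw.length := rfl
  rcases rfind_go_cases sw cur sw.length with ⟨he, hall⟩ | ⟨jm, hjm, he, hpre, _⟩
  · rw [hgo, he]
    simp only [true_iff]
    intro hinf
    rcases (infix_iff_prefix_drop cur sw).mp hinf with ⟨j, hj, hp⟩
    exact hall j hj hp
  · rw [hgo, he]
    constructor
    · intro h; omega
    · intro h
      exact absurd ((infix_iff_prefix_drop cur sw).mpr ⟨jm, hjm, hpre⟩) h

-- the predicate "some length-t prefix of the lookahead occurs in the window"
abbrev Ppred (sw la : List Char) (t : Nat) : Prop := 0 < t ∧ la.take t <:+: sw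

-- A's fold keeps the longest matched prefix so far and rfind's offset for it
lemma foldA_char (sw la : List Char) : ∀ m, m ≤ la.length →
    (List.range m).foldl
      (fun best k =>
        let i : Nat := k + 1
        let cur := PySem.List.slice la none (some (i : Int))
        let offset := PySem.Chars.rfind sw cur
        if offset ≠ -1 then
          let length := cur.length
          if length > best.2 then ((sw.length : Int) - offset, length) else best
        else best)
      ((0 : Int), (0 : Nat)) =
    (let L := Nat.findGreatest (Ppred sw la) m;
     if L = 0 then ((0 : Int), (0 : Nat)) else ((sw.length : Int) - PySem.Chars.rfind sw (la.take L), L)) := by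
  intro m
  induction m with
  | zero => intro _; simp
  | succ n ih =>
      intro hm
      rw [List.range_succ, List.foldl_append, ih (by omega)]
      simp only [List.foldl_cons, List.foldl_nil, PySem.List.slice_to_natCast]
      have hcur : (la.take (n + 1)).length = n + 1 := by simp [List.length_take]; omega
      by_cases hinf : la.take (n + 1) <:+: sw
      · have hne : PySem.Chars.rfind sw (la.take (n + 1)) ≠ -1 := by
          intro h; exact (rfind_eq_neg_one_iff sw (la.take (n+1))).mp h hinf
        rw [if_pos hne]
        have hP : Ppred sw la (n + 1) := ⟨by omega, hinf⟩
        have hFG : Nat.findGreatest (Ppred sw la) (n + 1) = n + 1 := by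
          rw [Nat.findGreatest_succ, if_pos hP]
        have hle : Nat.findGreatest (Ppred sw la) n ≤ n := Nat.findGreatest_le n
        by_cases h0 : Nat.findGreatest (Ppred sw la) n = 0
        · rw [if_pos h0, if_pos (by simp [hcur]), hFG, if_neg (Nat.succ_ne_zero n), hcur]
        · rw [if_neg h0, if_pos (by simp [hcur]; omega), hFG, if_neg (Nat.succ_ne_zero n), hcur]
      · have heq : PySem.Chars.rfind sw (la.take (n + 1)) = -1 :=
          (rfind_eq_neg_one_iff sw (la.take (n+1))).mpr hinf
        rw [heq]
        simp only [ne_eq, not_true_eq_false, if_false]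
        have hFG : Nat.findGreatest (Ppred sw la) (n + 1) = Nat.findGreatest (Ppred sw la) n := by
          rw [Nat.findGreatest_succ, if_neg (fun h => hinf h.2)]
        rw [hFG]

-- invariant of B's candidate scan: either nothing matched yet, or the accumulator holds the
-- rightmost candidate of maximal greedy match length among those processed
def GoodB (data : List Char) (start i laEnd m : Nat) (acc : Int × Nat) : Prop :=
  (acc = (-1, 0) ∧ ∀ j' < m, matchLenAt data i laEnd (start + j') 0 = 0) ∨
  (∃ j' < m, acc.1 = ((start + j' : Nat) : Int) ∧ acc.2 = matchLenAt data i laEnd (start + j') 0 ∧ 0 < acc.2 ∧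
    (∀ k' < m, matchLenAt data i laEnd (start + k') 0 ≤ acc.2) ∧
    (∀ k' < m, j' < k' → matchLenAt data i laEnd (start + k') 0 < acc.2))

lemma foldB_good (data : List Char) (start i laEnd : Nat) : ∀ m, m ≤ i - start →
    GoodB data start i laEnd m
      ((List.range' start m).foldl
        (fun best j =>
          let len := matchLenAt data i laEnd j 0
          if 0 < len ∧ best.2 ≤ len then ((j : Int), len) else best)
        ((-1 : Int), (0 : Nat))) := by
  intro m
  induction m with
  | zero => intro _; exact Or.inl ⟨rfl, by omega⟩
  | succ n ih =>
      intro hm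
      rw [List.range'_1_concat, List.foldl_append]
      simp only [List.foldl_cons, List.foldl_nil]
      have IH := ih (by omega)
      set acc := (List.range' start n).foldl
        (fun best j =>
          let len := matchLenAt data i laEnd j 0
          if 0 < len ∧ best.2 ≤ len then ((j : Int), len) else best)
        ((-1 : Int), (0 : Nat)) with hacc
      set len := matchLenAt data i laEnd (start + n) 0 with hlen
      by_cases hc : 0 < len ∧ acc.2 ≤ len
      · rw [if_pos hc]
        refine Or.inr ⟨n, by omega, rfl, rfl, hc.1, ?_, ?_⟩
        · intro k' hk'
          rcases Nat.lt_succ_iff_lt_or_eq.mp hk' with h' | h'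
          · rcases IH with ⟨_, hz⟩ | ⟨j', _, _, _, _, hbnd, _⟩
            · rw [hz k' h']; omega
            · exact le_trans (hbnd k' h') hc.2
          · subst h'; omega
        · intro k' hk' hnk'; omega
      · rw [if_neg hc]
        rcases IH with ⟨hae, hz⟩ | ⟨j', hj', ha1, ha2, hpos, hbnd, hstrict⟩
        · have hlz : len = 0 := by
            rcases Decidable.not_and_iff_not_or_not.mp hc with h | h
            · omega
            · rw [hae] at h; omega
          refine Or.inl ⟨hae, ?_⟩
          intro k' hk'
          rcases Nat.lt_succ_iff_lt_or_eq.mp hk' with h' | h'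
          · exact hz k' h'
          · subst h'; exact hlz
        · have hlt : len < acc.2 := by
            rcases Decidable.not_and_iff_not_or_not.mp hc with h | h
            · omega
            · omega
          refine Or.inr ⟨j', by omega, ha1, ha2, hpos, ?_, ?_⟩
          · intro k' hk'
            rcases Nat.lt_succ_iff_lt_or_eq.mp hk' with h' | h'
            · exact hbnd k' h'
            · subst h'; omega
          · intro k' hk' hjk'
            rcases Nat.lt_succ_iff_lt_or_eq.mp hk' with h' | h'
            · exact hstrict k' h' hjk'
            · subst h'; omega

-- the heart of the equivalence: on one window/lookahead pair, the two searches agree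
lemma core (data : List Char) (start i laEnd : Nat)
    (h1 : start ≤ i) (h2 : i ≤ laEnd) (h3 : laEnd ≤ data.length) :
    findLongestMatch ((data.drop start).take (i - start)) ((data.drop i).take (laEnd - i)) =
      (if 0 ≤ (bestMatch data start i laEnd).1 then (i : Int) - (bestMatch data start i laEnd).1 else 0,
       (bestMatch data start i laEnd).2) := by
  set sw := (data.drop start).take (i - start) with hsw
  set la := (data.drop i).take (laEnd - i) with hla
  have hswlen : sw.length = i - start := by
    rw [hsw]; simp [List.length_take, List.length_drop]; omega
  have hlalen : la.length = laEnd - i := by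
    rw [hla]; simp [List.length_take, List.length_drop]; omega
  have hGood := foldB_good data start i laEnd (i - start) le_rfl
  set b := bestMatch data start i laEnd with hb
  rw [bestMatch] at hb
  rw [← hb] at hGood
  set L := Nat.findGreatest (Ppred sw la) la.length with hLdef
  have F1 : ∀ j', j' < i - start → 0 < matchLenAt data i laEnd (start + j') 0 →
      matchLenAt data i laEnd (start + j') 0 ≤ L := by
    intro j' hj' hpos
    have hok := matchLenAt_ok0 data i laEnd (start + j') (by omega) h2
    have hpre := (prefix_iff_mok data start i laEnd h1 h2 h3 (start + j') (by omega) (by omega) _).mpr hok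
    rw [Nat.add_sub_cancel_left] at hpre
    apply Nat.le_findGreatest (by rw [hlalen]; exact hpre.2)
    exact ⟨hpos, (infix_iff_prefix_drop _ _).mpr ⟨j', by omega, hpre.1⟩⟩
  have F2 : ∀ t, 0 < t → t ≤ la.length → la.take t <:+: sw →
      ∃ j', j' < i - start ∧ MOk data i laEnd (start + j') t := by
    intro t ht htl hinf
    rcases (infix_iff_prefix_drop _ _).mp hinf with ⟨j, hjle, hpre⟩
    have hcl : (la.take t).length = t := by simp [List.length_take]; omega
    have hlen := hpre.length_le
    rw [hcl, List.length_drop, hswlen] at hlen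
    have hjlt : j < i - start := by omega
    refine ⟨j, hjlt, ?_⟩
    have := (prefix_iff_mok data start i laEnd h1 h2 h3 (start + j) (by omega) (by omega) t).mp
    rw [Nat.add_sub_cancel_left] at this
    exact this ⟨hpre, by omega⟩
  rw [findLongestMatch, foldA_char sw la la.length le_rfl]
  simp only []
  by_cases hL0 : L = 0
  · have hbv : b = (-1, 0) := by
      rcases hGood with ⟨hbe, _⟩ | ⟨j', hj', _, hb2, hpos, _, _⟩
      · exact hbe
      · exfalso
        have := F1 j' hj' (hb2 ▸ hpos)
        omega
    rw [← hLdef, if_pos hL0, hbv]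
    norm_num
  · rw [← hLdef, if_neg hL0]
    have hLle : L ≤ la.length := Nat.findGreatest_le la.length
    have hPL : Ppred sw la L := by
      have hne : ¬ ∀ m, 0 < m → m ≤ la.length → ¬ Ppred sw la m := by
        intro hall
        exact hL0 (Nat.findGreatest_eq_zero_iff.mpr hall)
      push Not at hne
      obtain ⟨m, hm1, hm2, hm3⟩ := hne
      exact hLdef ▸ Nat.findGreatest_spec hm2 hm3
    obtain ⟨j₀, hj₀, hok₀⟩ := F2 L hPL.1 hLle hPL.2
    have hm₀ : L ≤ matchLenAt data i laEnd (start + j₀) 0 := matchLenAt_max _ _ _ _ _ hok₀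
    rcases hGood with ⟨_, hz⟩ | ⟨j', hj', hb1, hb2, hpos, hbnd, hstrict⟩
    · exfalso; have := hz j₀ hj₀; omega
    have hbL : b.2 = L := by
      have h1' := F1 j' hj' (hb2 ▸ hpos)
      have h2' := hbnd j₀ hj₀
      omega
    have hcl : (la.take L).length = L := by simp [List.length_take]; omega
    have hpre₀ := ((prefix_iff_mok data start i laEnd h1 h2 h3 (start + j₀) (by omega) (by omega) L).mpr hok₀).1
    rw [Nat.add_sub_cancel_left] at hpre₀
    rcases rfind_go_cases sw (la.take L) sw.length with ⟨_, hall⟩ | ⟨jm, hjmle, he, hpre, hmax⟩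
    · exact absurd hpre₀ (hall j₀ (by omega))
    have hrf : PySem.Chars.rfind sw (la.take L) = (jm : Int) := he
    have hjmlt : jm < i - start := by
      have := hpre.length_le
      rw [hcl, List.length_drop, hswlen] at this
      have hLpos := hPL.1
      omega
    have hokm : MOk data i laEnd (start + jm) L := by
      have := (prefix_iff_mok data start i laEnd h1 h2 h3 (start + jm) (by omega) (by omega) L).mp
      rw [Nat.add_sub_cancel_left] at this
      exact this ⟨hpre, by omega⟩
    have hmm : L ≤ matchLenAt data i laEnd (start + jm) 0 := matchLenAt_max _ _ _ _ _ hokm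
    have hjmj' : jm ≤ j' := by
      by_contra hcon
      have := hstrict jm hjmlt (by omega)
      omega
    have hj'jm : j' ≤ jm := by
      by_contra hcon
      have hokj' : MOk data i laEnd (start + j') b.2 := hb2 ▸ matchLenAt_ok0 data i laEnd (start + j') (by omega) h2
      rw [hbL] at hokj'
      have hprej' := ((prefix_iff_mok data start i laEnd h1 h2 h3 (start + j') (by omega) (by omega) L).mpr hokj').1
      rw [Nat.add_sub_cancel_left] at hprej'
      exact hmax j' (by omega) (by omega) hprej'
    have hjeq : j' = jm := by omega
    rw [hrf, hbL, hb1, hjeq, if_pos (by positivity), hswlen]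
    congr 1
    push_cast
    omega

lemma loop_eq (data : List Char) (i : Nat) : lz77Loop data i = lz77LoopAlt data i := by
  rw [lz77Loop, lz77LoopAlt]
  by_cases h : i < data.length
  · rw [dif_pos h, dif_pos h]
    simp only [PySem.List.slice_natCast]
    have hcore := core data (i - 1000) i (min (i + 20) data.length) (by omega) (by omega) (by omega)
    rw [hcore]
    have := loop_eq data (i + (bestMatch data (i - 1000) i (min (i + 20) data.length)).2 + 1)
    rw [this]
  · rw [dif_neg h, dif_neg h]
  termination_by data.length - i
  decreasing_by omega

-- ===== VERDICT (by name: the statement is the Claim_ definition above) =====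
theorem compression_lz77_spec : Claim_equal_compression_lz77 := by
  intro data _
  unfold Spec_compression_lz77 compression_lz77 compression_lz77_alt
  exact loop_eq data.toList 0
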